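-- pv_equiv track=rewrite | github.com/ngc7331/XiangShan-utils | interface-doc/check.py | expand_name
-- ===== SOURCE A (Python) =====
-- from typing import List, Literal, Tuple
--
-- def expand_name(name: str) -> List[str]:
--     # expand xxx_0/1_yyy_0/1_zzz to [xxx_0_yyy_0_zzz, xxx_0_yyy_1_zzz, xxx_1_yyy_0_zzz, xxx_0_yyy_1_zzz]
--     parts = name.split("_")
--     expanded = [parts[0]]
--     for part in parts[1:]:
--         if "/" not in part:
--             expanded = [f"{pre}_{part}" for pre in expanded]
--             continue
--
--         nums = part.split("/")
--         for num in nums: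
--             if not num.isdigit():
--                 raise ValueError(f"Invalid number({num}) in {name}")
--         expanded = [f"{pre}_{num}" for pre in expanded for num in nums]
--
--     return expanded
-- ===== SOURCE B (Python) =====
-- def expand_name(name: str):
--     # Different decomposition: recursive back-to-front suffix expansion
--     # instead of A's forward prefix-accumulation loop.
--     parts = name.split("_")
--
--     def suffixes(i):
--         if i == len(parts):
--             return [""]
--         part = parts[i]
--         if "/" in part:
--             nums = part.split("/")
--             for num in nums:
--                 if not num.isdigit():
--                     raise ValueError(f"Invalid number({num}) in {name}")
--         else:
--             nums = [part]
--         rest = suffixes(i + 1)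
--         return ["_" + n + s for n in nums for s in rest]
--
--     return [parts[0] + s for s in suffixes(1)]
-- ===== Notes on version B (the rewrite author's own statement) =====
-- stated objective: alternative
-- what changed: A accumulates prefixes left-to-right in a foldl over the parts; B recursively builds all suffix combinations back-to-front and prepends the first part once.
import Mathlib
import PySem

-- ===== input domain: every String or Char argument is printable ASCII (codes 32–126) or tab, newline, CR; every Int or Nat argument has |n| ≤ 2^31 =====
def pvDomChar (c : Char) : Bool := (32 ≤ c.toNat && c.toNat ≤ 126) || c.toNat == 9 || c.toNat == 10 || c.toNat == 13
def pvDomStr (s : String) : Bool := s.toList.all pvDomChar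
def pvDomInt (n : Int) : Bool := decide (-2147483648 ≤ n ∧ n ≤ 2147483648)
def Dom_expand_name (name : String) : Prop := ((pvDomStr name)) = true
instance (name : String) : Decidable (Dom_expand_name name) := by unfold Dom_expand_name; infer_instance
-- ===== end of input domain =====

-- B replaces A's forward prefix-accumulation loop by a recursive back-to-front
-- suffix expansion (objective: alternative decomposition, same cost).

-- ===== PORT A =====
def expand_name (name : String) : List String :=
  let parts := (PySem.Str.split? name "_").getD []
  (parts.drop 1).foldl
    (fun expanded part =>
      if PySem.Str.isIn "/" part = false then
        expanded.map (fun pre => pre ++ "_" ++ part)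
      else
        let nums := (PySem.Str.split? part "/").getD []
        if nums.all PySem.Str.strIsdigit then
          expanded.flatMap (fun pre => nums.map (fun num => pre ++ "_" ++ num))
        else
          []  -- Python raises ValueError here; Pre_expand_name excludes these inputs
    )
    [parts.headD ""]  -- parts[0]; split always yields a nonempty list

-- ===== PORT B =====
-- B's recursive helper suffixes(i) over parts[1:], transcribed as list recursion
def expandSuffixes : List String → List String
  | [] => [""]
  | part :: rest =>
    let nums :=
      if PySem.Str.isIn "/" part then
        if ((PySem.Str.split? part "/").getD []).all PySem.Str.strIsdigit then
          (PySem.Str.split? part "/").getD []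
        else
          []  -- Python raises ValueError here; Pre_expand_name excludes these inputs
      else [part]
    nums.flatMap (fun n => (expandSuffixes rest).map (fun s => "_" ++ n ++ s))

def expand_name_alt (name : String) : List String :=
  let parts := (PySem.Str.split? name "_").getD []
  (expandSuffixes (parts.drop 1)).map (fun s => parts.headD "" ++ s)

-- ===== PRECONDITION & SPEC =====
-- Pre_ excludes exactly the inputs on which A raises ValueError: a part after the
-- first that contains a slash but has a slash-separated token that is not all digits.
def Pre_expand_name (name : String) : Prop :=
  ∀ part ∈ ((PySem.Str.split? name "_").getD []).drop 1,
    PySem.Str.isIn "/" part = true →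
    ∀ num ∈ (PySem.Str.split? part "/").getD [], PySem.Str.strIsdigit num = true
instance (name : String) : Decidable (Pre_expand_name name) := by
  unfold Pre_expand_name; infer_instance

def pvWitness_expand_name : String := "xxx_0/1_yyy"

def Spec_expand_name (name : String) (out : List String) : Prop := out = expand_name_alt name
instance (name : String) (out : List String) : Decidable (Spec_expand_name name out) := by
  unfold Spec_expand_name; infer_instance

-- ===== CLAIM =====
def Claim_equal_expand_name : Prop :=
  ∀ (name : String), Dom_expand_name name → Pre_expand_name name →
    Spec_expand_name name (expand_name name)

-- ===== LEMMAS AND PROOFS =====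
theorem foldl_eq_suffixes (ps : List String) (acc : List String)
    (hp : ∀ part ∈ ps, PySem.Str.isIn "/" part = true →
        ∀ num ∈ (PySem.Str.split? part "/").getD [], PySem.Str.strIsdigit num = true) :
    ps.foldl
      (fun expanded part =>
        if PySem.Str.isIn "/" part = false then
          expanded.map (fun pre => pre ++ "_" ++ part)
        else
          let nums := (PySem.Str.split? part "/").getD []
          if nums.all PySem.Str.strIsdigit then
            expanded.flatMap (fun pre => nums.map (fun num => pre ++ "_" ++ num))
          else []) acc
    = acc.flatMap (fun pre => (expandSuffixes ps).map (fun s => pre ++ s)) := by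
  induction ps generalizing acc with
  | nil => simp [expandSuffixes]
  | cons part rest ih =>
    have hrest := fun p hp' => hp p (List.mem_cons_of_mem _ hp')
    by_cases h : PySem.Str.isIn "/" part = true
    · have hd : ((PySem.Str.split? part "/").getD []).all PySem.Str.strIsdigit = true := by
        rw [List.all_eq_true]; exact fun n hn => hp part List.mem_cons_self h n hn
      simp only [List.foldl_cons, h, Bool.true_eq_false, if_false, hd, if_true]
      rw [ih _ hrest]
      have h2 : PySem.Chars.isIn ['/'] part.toList = true := h
      simp [expandSuffixes, h2, hd, Function.comp_def, List.flatMap_map, List.map_flatMap,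
        List.flatMap_assoc, String.append_assoc]
    · rw [Bool.not_eq_true] at h
      simp only [List.foldl_cons, h, if_true]
      rw [ih _ hrest]
      have h2 : PySem.Chars.isIn ['/'] part.toList = false := h
      simp [expandSuffixes, h2, Function.comp_def, List.flatMap_map,
        String.append_assoc]

-- ===== VERDICT =====
theorem expand_name_spec : Claim_equal_expand_name := by
  intro name _ hpre
  unfold Spec_expand_name expand_name expand_name_alt
  rw [foldl_eq_suffixes _ _ hpre]
  simp
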